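-- pv_equiv track=rewrite | github.com/germansola/Modelos_y_Simulacion | Ejercicio1.py | is_congruencial_periodo_maximo
-- ===== SOURCE A (Python) =====
-- from math import gcd as mcd
--
-- def is_congruencial_periodo_maximo(a, c, m):
--     """
--     Determina si el generador congruencial tiene periodo máximo
--     """
--
--     def descomponer_en_primos(n):
--         """
--         Descompone un número en sus factores primos
--         """
--         factores = []
--         for i in range(2, n + 1):
--             while n % i == 0:
--                 factores.append(i)
--                 n //= i
--         return factores
--
--     # si el generador es multiplicativo (c = 0), entonces u nbuen generado no deberia alcanzar nunca el valor 0,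
--     # de lo contrario la secuencia degenaria e una sucesion infinita de ceros. Por lo tanto, para obtener un perido maximo,
--     # esto es K=M, necesariamente debe ser un generador mixt
--     #por lo tanto:
--     if c == 0:
--         return False
--     # el maximo comun divisor entre c y M es 1: (c,M) = 1.
--     if mcd(c, m) != 1:
--         return False
--     # a congruente 1 mod p, para cualquier factor primo p de M.
--     for p in descomponer_en_primos(m):
--         if (a % p) != 1:
--             return False
--     # Si 4 divide a M, entonces a congruente 1 mod 4.
--     if (m % 4 == 0) and (a % 4 != 1):
--         return False
--     return True
-- ===== SOURCE B (Python) =====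
-- from math import gcd as mcd
--
-- def is_congruencial_periodo_maximo(a, c, m):
--     """
--     Hull-Dobell check by trial division up to sqrt(m) only (leftover factor
--     handled separately) instead of scanning every i in 2..m.
--     """
--     if c == 0 or mcd(c, m) != 1:
--         return False
--     n, p = m, 2
--     while p * p <= n:
--         if n % p == 0:
--             if a % p != 1:
--                 return False
--             while n % p == 0:
--                 n //= p
--         p += 1
--     if n > 1 and a % n != 1:
--         return False
--     return m % 4 != 0 or a % 4 == 1
-- ===== Notes on version B (the rewrite author's own statement) =====
-- stated objective: faster
-- what changed: B factors m by trial division only up to sqrt(m) with the remaining cofactor treated as the last prime, and checks a % p == 1 inline with early exit, instead of A's full scan of every i in 2..m to build the complete multiset of prime factors before checking.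
import Mathlib
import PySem

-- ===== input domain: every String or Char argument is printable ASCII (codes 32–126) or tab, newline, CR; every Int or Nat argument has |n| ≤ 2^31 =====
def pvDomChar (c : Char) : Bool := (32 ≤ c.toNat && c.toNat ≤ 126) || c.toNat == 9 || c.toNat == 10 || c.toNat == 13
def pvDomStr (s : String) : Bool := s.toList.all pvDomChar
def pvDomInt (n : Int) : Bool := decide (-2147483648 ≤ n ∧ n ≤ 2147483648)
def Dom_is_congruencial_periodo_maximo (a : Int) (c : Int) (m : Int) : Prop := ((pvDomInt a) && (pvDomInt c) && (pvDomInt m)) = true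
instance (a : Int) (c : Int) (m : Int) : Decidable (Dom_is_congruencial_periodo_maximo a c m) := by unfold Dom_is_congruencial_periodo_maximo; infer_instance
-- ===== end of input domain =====

-- B replaces A's full 2..m trial-division scan by trial division up to sqrt(m) with a leftover
-- cofactor, checked inline: asymptotically faster (O(sqrt m) vs O(m)), same return value everywhere.

-- ===== PORT A =====
-- inner `while n % i == 0` of descomponer_en_primos; the extra conjuncts 2 ≤ i ∧ 0 < n are
-- totality guards only: on every state the Python loop reaches, i comes from range(2, …) and
-- n ≥ 1, so the guard coincides with Python's `n % i == 0`.
def pvStripA (i n : Int) (acc : List Int) : List Int × Int :=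
  if h : PySem.Int.mod n i = 0 ∧ 2 ≤ i ∧ 0 < n then
    pvStripA i (PySem.Int.floordiv n i) (acc ++ [i])
  else (acc, n)
termination_by n.toNat
decreasing_by
  have h2 : PySem.Int.floordiv n i < n := (PySem.Int.floordiv_lt_iff_lt_mul (by omega)).mpr (by nlinarith)
  have h3 : (0 : Int) ≤ PySem.Int.floordiv n i := (PySem.Int.le_floordiv_iff_mul_le (by omega)).mpr (by nlinarith)
  omega

-- descomponer_en_primos(n): `for i in range(2, n+1): while n % i == 0: factores.append(i); n //= i`
def pvDescomponer (n : Int) : List Int :=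
  ((PySem.List.pyRange 2 (n + 1) 1).foldl (fun st i => pvStripA i st.2 st.1)
    (([] : List Int), n)).1

-- `for p in descomponer_en_primos(m): if (a % p) != 1: return False`
def pvCheckA (a : Int) : List Int → Bool
  | [] => true
  | p :: rest => if PySem.Int.mod a p ≠ 1 then false else pvCheckA a rest

def is_congruencial_periodo_maximo (a : Int) (c : Int) (m : Int) : Bool :=
  if c = 0 then false
  else if Int.gcd c m ≠ 1 then false
  else if pvCheckA a (pvDescomponer m) then
    (if PySem.Int.mod m 4 = 0 ∧ PySem.Int.mod a 4 ≠ 1 then false else true)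
  else false

-- ===== PORT B =====
-- helper needed by pvLoopB's termination proof
theorem pvLeMulSelf (p : Int) : p ≤ p * p := by
  nlinarith [sq_nonneg p, sq_nonneg (p - 1)]

-- inner `while n % p == 0: n //= p`; same totality guards as pvStripA.
def pvStripB (p n : Int) : Int :=
  if h : PySem.Int.mod n p = 0 ∧ 2 ≤ p ∧ 0 < n then
    pvStripB p (PySem.Int.floordiv n p)
  else n
termination_by n.toNat
decreasing_by
  have h2 : PySem.Int.floordiv n p < n := (PySem.Int.floordiv_lt_iff_lt_mul (by omega)).mpr (by nlinarith)
  have h3 : (0 : Int) ≤ PySem.Int.floordiv n p := (PySem.Int.le_floordiv_iff_mul_le (by omega)).mpr (by nlinarith)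
  omega

theorem pvStripB_le (p n : Int) : pvStripB p n ≤ n := by
  fun_induction pvStripB p n with
  | case1 n h ih =>
    have h2 : PySem.Int.floordiv n p < n := (PySem.Int.floordiv_lt_iff_lt_mul (by omega)).mpr (by nlinarith [h.2.1, h.2.2])
    omega
  | case2 n h => exact le_refl n

-- `while p * p <= n: …` followed by the leftover-factor check; returns the prime-condition verdict.
def pvLoopB (a p n : Int) : Bool :=
  if p * p ≤ n then
    if PySem.Int.mod n p = 0 then
      if PySem.Int.mod a p ≠ 1 then false
      else pvLoopB a (p + 1) (pvStripB p n)
    else pvLoopB a (p + 1) n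
  else
    if 1 < n ∧ PySem.Int.mod a n ≠ 1 then false else true
termination_by (n + 1 - p).toNat
decreasing_by
  · have h1 := pvStripB_le p n
    have h2 := pvLeMulSelf p
    omega
  · have h2 := pvLeMulSelf p
    omega

def is_congruencial_periodo_maximo_alt (a : Int) (c : Int) (m : Int) : Bool :=
  if c = 0 ∨ Int.gcd c m ≠ 1 then false
  else if pvLoopB a 2 m then
    decide (PySem.Int.mod m 4 ≠ 0) || decide (PySem.Int.mod a 4 = 1)
  else false

-- ===== PRECONDITION & SPEC =====
def Spec_is_congruencial_periodo_maximo (a : Int) (c : Int) (m : Int) (out : Bool) : Prop := out = is_congruencial_periodo_maximo_alt a c m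
instance (a : Int) (c : Int) (m : Int) (out : Bool) : Decidable (Spec_is_congruencial_periodo_maximo a c m out) := by unfold Spec_is_congruencial_periodo_maximo; infer_instance

-- ===== CLAIM (what is proved, stated in full; the proofs are below) =====
def Claim_equal_is_congruencial_periodo_maximo : Prop := ∀ (a : Int) (c : Int) (m : Int), Dom_is_congruencial_periodo_maximo a c m → Spec_is_congruencial_periodo_maximo a c m (is_congruencial_periodo_maximo a c m)

-- ===== LEMMAS AND PROOFS =====

-- the state of descomponer's outer for-loop, range end e, as proofs manipulate it
def pvFoldA (i e n : Int) (acc : List Int) : List Int × Int :=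
  (PySem.List.pyRange i e 1).foldl (fun st j => pvStripA j st.2 st.1) (acc, n)

theorem pvDescomponer_eq (n : Int) : pvDescomponer n = (pvFoldA 2 (n + 1) n []).1 := rfl

theorem pvFoldA_nil (i e n : Int) (acc : List Int) (h : e ≤ i) :
    pvFoldA i e n acc = (acc, n) := by
  simp [pvFoldA, PySem.List.pyRange_one_eq_nil h]

theorem pvFoldA_cons (i e n : Int) (acc : List Int) (h : i < e) :
    pvFoldA i e n acc = pvFoldA (i + 1) e (pvStripA i n acc).2 (pvStripA i n acc).1 := by
  rw [pvFoldA, PySem.List.pyRange_one_cons h, List.foldl_cons]; rfl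

theorem pvCheckA_append (a : Int) (l₁ l₂ : List Int) :
    pvCheckA a (l₁ ++ l₂) = (pvCheckA a l₁ && pvCheckA a l₂) := by
  induction l₁ with
  | nil => simp [pvCheckA]
  | cons p rest ih => by_cases hp : PySem.Int.mod a p ≠ 1 <;> simp [pvCheckA, hp, ih]

theorem pvStripA_snd (i n : Int) (acc : List Int) : (pvStripA i n acc).2 = pvStripB i n := by
  fun_induction pvStripA i n acc with
  | case1 n acc h ih =>
    rw [ih]
    conv_rhs => rw [pvStripB.eq_def]
    rw [dif_pos h]
  | case2 n acc h =>
    conv_rhs => rw [pvStripB.eq_def]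
    rw [dif_neg h]

theorem pvStripA_check (a i n : Int) (acc : List Int) (hi : 2 ≤ i) :
    pvCheckA a (pvStripA i n acc).1 =
      (pvCheckA a acc &&
        (if PySem.Int.mod n i = 0 ∧ 0 < n then decide (PySem.Int.mod a i = 1) else true)) := by
  fun_induction pvStripA i n acc with
  | case1 n acc h ih =>
    rw [ih]
    rw [pvCheckA_append]
    have hsingle : pvCheckA a [i] = decide (PySem.Int.mod a i = 1) := by
      by_cases hx : PySem.Int.mod a i = 1 <;> simp [pvCheckA, hx]
    rw [hsingle]
    simp only [h.1, h.2.2, and_self, if_true, Bool.and_assoc]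
    by_cases hc : PySem.Int.mod (PySem.Int.floordiv n i) i = 0 ∧ 0 < PySem.Int.floordiv n i <;>
      by_cases hx : PySem.Int.mod a i = 1 <;> simp [hc, hx]
  | case2 n acc h =>
    have : ¬ (PySem.Int.mod n i = 0 ∧ 0 < n) := by
      intro hc; exact h ⟨hc.1, hi, hc.2⟩
    simp [pvStripA, h, this]

theorem pvStripB_pos (i n : Int) (hn : 1 ≤ n) : 1 ≤ pvStripB i n := by
  fun_induction pvStripB i n with
  | case1 n h ih =>
    apply ih
    have hdvd : i ∣ n := (PySem.Int.mod_eq_zero_iff_dvd n i).mp h.1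
    have hle : i ≤ n := Int.le_of_dvd (by omega) hdvd
    have hle2 : (1 : Int) ≤ PySem.Int.floordiv n i := (PySem.Int.le_floordiv_iff_mul_le (by omega)).mpr (by omega)
    exact hle2
  | case2 n h => exact hn

theorem pvStripB_dvd (i n : Int) : pvStripB i n ∣ n := by
  fun_induction pvStripB i n with
  | case1 n h ih =>
    have hdvd : i ∣ n := (PySem.Int.mod_eq_zero_iff_dvd n i).mp h.1
    have heq : PySem.Int.floordiv n i * i = n := by
      have := PySem.Int.floordiv_mul_add_mod n i
      rw [h.1] at this; omega
    exact dvd_trans ih ⟨i, heq.symm⟩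
  | case2 n h => exact dvd_refl n

theorem pvStripB_not_dvd (i n : Int) (hi : 2 ≤ i) (hn : 1 ≤ n) : ¬ i ∣ pvStripB i n := by
  fun_induction pvStripB i n with
  | case1 n h ih =>
    apply ih
    have hdvd : i ∣ n := (PySem.Int.mod_eq_zero_iff_dvd n i).mp h.1
    have hle : i ≤ n := Int.le_of_dvd (by omega) hdvd
    have hle2 : (1 : Int) ≤ PySem.Int.floordiv n i := (PySem.Int.le_floordiv_iff_mul_le (by omega)).mpr (by omega)
    exact hle2
  | case2 n h =>
    intro hdvd
    exact h ⟨(PySem.Int.mod_eq_zero_iff_dvd n i).mpr hdvd, hi, by omega⟩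

-- A's scan past sqrt(n): once n has no divisor below i and n < i*i, the rest of the range only
-- ever extracts the single leftover factor n (if n > 1), matching B's post-loop check.
theorem pvTail (a e : Int) :
    ∀ (k : Nat) (i n : Int) (acc : List Int), (e - i).toNat ≤ k → 2 ≤ i → 1 ≤ n → n < i * i →
      (∀ d : Int, 2 ≤ d → d < i → ¬ d ∣ n) → (n = 1 ∨ n < e) →
      pvCheckA a (pvFoldA i e n acc).1 =
        (pvCheckA a acc && (if 1 < n ∧ PySem.Int.mod a n ≠ 1 then false else true)) := by
  intro k
  induction k with
  | zero =>
    intro i n acc hk hi hn hsq hnd hne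
    have hn1 : n = 1 := by
      rcases hne with h1 | h1
      · exact h1
      · by_contra hne1
        exact hnd n (by omega) (by omega) (dvd_refl n)
    rw [pvFoldA_nil _ _ _ _ (by omega)]
    simp [hn1]
  | succ k ih =>
    intro i n acc hk hi hn hsq hnd hne
    by_cases hei : e ≤ i
    · have hn1 : n = 1 := by
        rcases hne with h1 | h1
        · exact h1
        · by_contra hne1
          exact hnd n (by omega) (by omega) (dvd_refl n)
      rw [pvFoldA_nil _ _ _ _ hei]
      simp [hn1]
    · push_neg at hei
      rw [pvFoldA_cons _ _ _ _ hei, pvStripA_snd]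
      by_cases hdvd : PySem.Int.mod n i = 0
      · -- i divides n; since n < i*i and n has no divisor below i, n = i
        have hdv : i ∣ n := (PySem.Int.mod_eq_zero_iff_dvd n i).mp hdvd
        have hni : n = i := by
          obtain ⟨q, hq⟩ := hdv
          have hq1 : 1 ≤ q := by nlinarith
          have hqi : q < i := by nlinarith
          have hqd : q ∣ n := ⟨i, by rw [hq]; ring⟩
          have : q = 1 := by
            by_contra hq2
            exact hnd q (by omega) hqi hqd
          rw [this, mul_one] at hq
          exact hq
        have hstrip1 : pvStripB i n = 1 := by
          have hpos := pvStripB_pos i n hn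
          have hdvdn := pvStripB_dvd i n
          have hnotd := pvStripB_not_dvd i n hi hn
          set s := pvStripB i n with hs
          have hle : s ≤ n := Int.le_of_dvd (by omega) hdvdn
          by_contra hs1
          have hsi : s ≠ i := by
            intro h; exact hnotd (h ▸ dvd_refl i)
          exact hnd s (by omega) (by omega) hdvdn
        have hnd' : ∀ d : Int, 2 ≤ d → d < i + 1 → ¬ d ∣ pvStripB i n := by
          intro d hd1 hd2 hd3
          rw [hstrip1] at hd3
          have := Int.le_of_dvd (by omega) hd3
          omega
        rw [ih (i + 1) (pvStripB i n) _ (by omega) (by omega) (by omega)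
          (by rw [hstrip1]; nlinarith) hnd' (Or.inl hstrip1)]
        rw [pvStripA_check a i n acc hi,
          if_pos (⟨hdvd, by omega⟩ : PySem.Int.mod n i = 0 ∧ (0:Int) < n), hstrip1]
        have h2i : (1:Int) < i := by omega
        rw [hni]
        by_cases hx : PySem.Int.mod a i = 1 <;> simp [hx, h2i]
      · have hsa : pvStripA i n acc = (acc, n) := by
          rw [pvStripA.eq_def, dif_neg (fun hc => hdvd hc.1)]
        have hsb : pvStripB i n = n := by
          rw [pvStripB.eq_def, dif_neg (fun hc => hdvd hc.1)]
        rw [hsa, hsb]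
        exact ih (i + 1) n acc (by omega) (by omega) hn (by nlinarith)
          (by intro d hd1 hd2 hdd
              rcases lt_or_eq_of_le (by omega : d ≤ i) with h | h
              · exact hnd d hd1 h hdd
              · subst h; exact hdvd ((PySem.Int.mod_eq_zero_iff_dvd n d).mpr hdd))
          hne

-- main correspondence: A's remaining scan from i equals B's loop from p = i
theorem pvCore (a e : Int) :
    ∀ (k : Nat) (i n : Int) (acc : List Int), (e - i).toNat ≤ k → 2 ≤ i → 1 ≤ n →
      (∀ d : Int, 2 ≤ d → d < i → ¬ d ∣ n) → (n = 1 ∨ n < e) →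
      pvCheckA a (pvFoldA i e n acc).1 = (pvCheckA a acc && pvLoopB a i n) := by
  intro k
  induction k with
  | zero =>
    intro i n acc hk hi hn hnd hne
    have hsq : ¬ i * i ≤ n := by
      intro hc
      have hii : i ≤ i * i := pvLeMulSelf i
      rcases hne with h1 | h1
      · nlinarith
      · omega
    rw [pvLoopB, if_neg hsq]
    exact pvTail a e 0 i n acc hk hi hn (by omega) hnd hne
  | succ k ih =>
    intro i n acc hk hi hn hnd hne
    by_cases hsq : i * i ≤ n
    · have hii : i ≤ i * i := pvLeMulSelf i
      have hne' : n < e := by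
        rcases hne with h1 | h1
        · omega
        · exact h1
      have hei : i < e := by omega
      rw [pvFoldA_cons _ _ _ _ hei, pvStripA_snd, pvLoopB, if_pos hsq]
      by_cases hdvd : PySem.Int.mod n i = 0
      · rw [if_pos hdvd]
        have hpos := pvStripB_pos i n hn
        have hdvdn := pvStripB_dvd i n
        have hnotd := pvStripB_not_dvd i n hi hn
        have hle : pvStripB i n ≤ n := Int.le_of_dvd (by omega) hdvdn
        rw [ih (i + 1) (pvStripB i n) _ (by omega) (by omega) hpos
          (by intro d hd1 hd2 hdd
              rcases lt_or_eq_of_le (by omega : d ≤ i) with h | h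
              · exact hnd d hd1 h (dvd_trans hdd hdvdn)
              · subst h; exact hnotd hdd)
          (Or.inr (by omega))]
        rw [pvStripA_check a i n acc hi,
          if_pos (⟨hdvd, by omega⟩ : PySem.Int.mod n i = 0 ∧ (0:Int) < n)]
        by_cases hx : PySem.Int.mod a i = 1 <;> simp [hx]
      · rw [if_neg hdvd]
        have hsa : pvStripA i n acc = (acc, n) := by
          rw [pvStripA.eq_def, dif_neg (fun hc => hdvd hc.1)]
        have hsb : pvStripB i n = n := by
          rw [pvStripB.eq_def, dif_neg (fun hc => hdvd hc.1)]
        rw [hsa, hsb]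
        exact ih (i + 1) n acc (by omega) (by omega) hn
          (by intro d hd1 hd2 hdd
              rcases lt_or_eq_of_le (by omega : d ≤ i) with h | h
              · exact hnd d hd1 h hdd
              · subst h; exact hdvd ((PySem.Int.mod_eq_zero_iff_dvd n d).mpr hdd))
          hne
    · rw [pvLoopB, if_neg hsq]
      exact pvTail a e (k + 1) i n acc hk hi hn (by omega) hnd hne

theorem pvKey (a m : Int) : pvCheckA a (pvDescomponer m) = pvLoopB a 2 m := by
  by_cases hm : 1 ≤ m
  · rw [pvDescomponer_eq]
    have := pvCore a (m + 1) (m + 1 - 2).toNat 2 m [] (le_refl _) (by omega) hm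
      (by intro d hd1 hd2 _; omega) (Or.inr (by omega))
    rw [this]
    simp [pvCheckA]
  · have hnil : pvDescomponer m = [] := by
      rw [pvDescomponer_eq, pvFoldA_nil _ _ _ _ (by omega)]
    rw [hnil, pvLoopB]
    rw [if_neg (by omega : ¬ (2 : Int) * 2 ≤ m), if_neg (by omega)]
    simp [pvCheckA]

-- ===== VERDICT (by name: the statement is the Claim_ definition above) =====
theorem is_congruencial_periodo_maximo_spec : Claim_equal_is_congruencial_periodo_maximo := by
  intro a c m _
  unfold Spec_is_congruencial_periodo_maximo
  unfold is_congruencial_periodo_maximo is_congruencial_periodo_maximo_alt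
  by_cases hc : c = 0
  · simp [hc]
  · by_cases hg : Int.gcd c m = 1
    · simp only [hc, hg, ne_eq, not_true_eq_false, if_false, if_neg (by tauto : ¬ (c = 0 ∨ ¬ Int.gcd c m = 1))]
      rw [pvKey]
      cases hb : pvLoopB a 2 m
      · simp
      · simp only [if_pos rfl]
        by_cases h4 : PySem.Int.mod m 4 = 0 <;> by_cases ha4 : PySem.Int.mod a 4 = 1 <;>
          simp [h4, ha4]
    · simp [hc, hg]
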